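-- pv_equiv track=rewrite | github.com/mfnch/pyrtist | pyrtist/pyrtist/gui/dox/block.py | split_block
-- ===== SOURCE A (Python) =====
-- def split_block(doxblock_content):
--   '''Takes the content of a documentation block and split the block
--   identification keyword and the content returning. Below is an example.
--   Each documentation block starts with a block identifier. For example,
--
--   ///Intro: a brief
--   // introduction.
--
--   This function takes the string 'Intro: a brief introduction.' and returns
--   a tuple ('Intro', 'a brief introduction.') or (None, None) if the split
--   was not possible.'''
--
--   args = tuple(item for item in map(doxblock_content.find, (":", "."))
--                if item >= 0)
--   if not args:
--     return (None, None)
--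
--   idx = min(args)
--   if idx == None:
--     return (None, None)
--
--   block_type = doxblock_content[:idx].strip()
--   block_content = doxblock_content[idx + 1:].strip()
--   return (block_type, block_content)
-- ===== SOURCE B (Python) =====
-- def split_block(doxblock_content):
--   idx = next((i for i, c in enumerate(doxblock_content) if c in ':.'), None)
--   if idx is None:
--     return (None, None)
--   return (doxblock_content[:idx].strip(), doxblock_content[idx + 1:].strip())
-- ===== Notes on version B (the rewrite author's own statement) =====
-- stated objective: simpler
-- what changed: Replaces two full substring-find scans (one per delimiter) plus a filter-and-min reduction with a single left-to-right scan for the first delimiter character (colon or period).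
import Mathlib
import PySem

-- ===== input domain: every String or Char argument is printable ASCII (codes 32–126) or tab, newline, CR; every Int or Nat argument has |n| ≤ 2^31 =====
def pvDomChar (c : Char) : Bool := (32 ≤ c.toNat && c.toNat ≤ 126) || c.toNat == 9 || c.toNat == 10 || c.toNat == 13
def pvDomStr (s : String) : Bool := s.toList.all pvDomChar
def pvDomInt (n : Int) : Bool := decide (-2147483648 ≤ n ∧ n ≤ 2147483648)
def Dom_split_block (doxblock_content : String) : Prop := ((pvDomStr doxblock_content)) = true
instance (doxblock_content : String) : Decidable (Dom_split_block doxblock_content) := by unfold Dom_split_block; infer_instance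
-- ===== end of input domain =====

-- B replaces A's two full find scans plus filter-and-min with one left-to-right scan for the first ':' or '.' (simpler; return-value equivalence).

-- ===== PORT A =====
-- args = tuple(item for item in map(find, (":", ".")) if item >= 0); if not args: (None,None); idx = min(args)
def splitBlockArgsMin (x y : Int) : Option Int :=
  match ([x, y]).filter (fun item => decide (0 ≤ item)) with
  | [] => none
  | a :: rest => some (rest.foldl min a)

def split_block (doxblock_content : String) : Option String × Option String :=
  match splitBlockArgsMin (PySem.Str.find doxblock_content ":") (PySem.Str.find doxblock_content ".") with
  | none => (none, none)   -- 'if not args: return (None, None)'  ('if idx == None' in A is dead code: min of a nonempty int tuple is an int)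
  | some idx =>
    (some (PySem.Str.strip (PySem.Str.slice doxblock_content none (some idx))),
     some (PySem.Str.strip (PySem.Str.slice doxblock_content (some (idx + 1)) none)))

-- ===== PORT B =====
-- next((i for i, c in enumerate(s) if c in ':.'), None)
def findDelim : List Char → Option Nat
  | [] => none
  | c :: cs => if c = ':' ∨ c = '.' then some 0 else (findDelim cs).map (· + 1)

def split_block_alt (doxblock_content : String) : Option String × Option String :=
  match findDelim doxblock_content.toList with
  | none => (none, none)
  | some i =>
    (some (PySem.Str.strip (PySem.Str.slice doxblock_content none (some (i : Int)))),
     some (PySem.Str.strip (PySem.Str.slice doxblock_content (some ((i : Int) + 1)) none)))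

-- ===== PRECONDITION & SPEC =====
def Spec_split_block (doxblock_content : String) (out : Option String × Option String) : Prop := out = split_block_alt doxblock_content
instance (doxblock_content : String) (out : Option String × Option String) : Decidable (Spec_split_block doxblock_content out) := by unfold Spec_split_block; infer_instance

-- ===== CLAIM (what is proved, stated in full; the proofs are below) =====
def Claim_equal_split_block : Prop := ∀ (doxblock_content : String), Dom_split_block doxblock_content → Spec_split_block doxblock_content (split_block doxblock_content)

-- ===== LEMMAS AND PROOFS =====

theorem go_shift (c : Char) (s : List Char) (k : Nat) :
    PySem.Chars.find.go [c] s k = if PySem.Chars.find.go [c] s 0 = -1 then -1 else PySem.Chars.find.go [c] s 0 + k := by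
  induction s generalizing k with
  | nil => simp [PySem.Chars.find.go, List.isEmpty]
  | cons a s ih =>
    rw [show PySem.Chars.find.go [c] (a :: s) k = if [c].isPrefixOf (a :: s) then (k : Int) else PySem.Chars.find.go [c] s (k+1) from rfl,
        show PySem.Chars.find.go [c] (a :: s) 0 = if [c].isPrefixOf (a :: s) then (0 : Int) else PySem.Chars.find.go [c] s 1 from rfl]
    by_cases h : [c].isPrefixOf (a :: s) = true
    · simp [h]
    · simp only [h, Bool.false_eq_true, if_false]
      have hge : -1 ≤ PySem.Chars.find.go [c] s 0 := PySem.Chars.neg_one_le_find s [c]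
      rw [ih (k+1), ih 1]
      split_ifs <;> push_cast <;> omega

theorem find_cons (a : Char) (s : List Char) (c : Char) :
    PySem.Chars.find (a :: s) [c] = if a = c then 0 else (if PySem.Chars.find s [c] = -1 then -1 else PySem.Chars.find s [c] + 1) := by
  unfold PySem.Chars.find
  rw [show PySem.Chars.find.go [c] (a :: s) 0 = if [c].isPrefixOf (a :: s) then (0 : Int) else PySem.Chars.find.go [c] s 1 from rfl]
  have hpre : [c].isPrefixOf (a :: s) = (a == c) := by simp [List.isPrefixOf, eq_comm]
  rw [hpre]
  by_cases h : a = c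
  · simp [h]
  · simp only [h, beq_iff_eq, if_false]
    exact go_shift c s 1

-- the A-side filter-and-min of the shifted finds is the shift of the filter-and-min
theorem argsMin_shift (x y : Int) (hx : -1 ≤ x) (hy : -1 ≤ y) :
    splitBlockArgsMin (if x = -1 then -1 else x + 1) (if y = -1 then -1 else y + 1)
      = (splitBlockArgsMin x y).map (· + 1) := by
  have hneg : ¬ ((0:Int) ≤ -1) := by norm_num
  by_cases hx1 : x = -1 <;> by_cases hy1 : y = -1
  · simp [splitBlockArgsMin, List.filter, hx1, hy1]
  · have hy0 : (0:Int) ≤ y := by omega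
    have hy0' : (0:Int) ≤ y + 1 := by omega
    simp [splitBlockArgsMin, List.filter, hx1, hy1, hy0, hy0']
  · have hx0 : (0:Int) ≤ x := by omega
    have hx0' : (0:Int) ≤ x + 1 := by omega
    simp [splitBlockArgsMin, List.filter, hx1, hy1, hx0, hx0']
  · have hx0 : (0:Int) ≤ x := by omega
    have hx0' : (0:Int) ≤ x + 1 := by omega
    have hy0 : (0:Int) ≤ y := by omega
    have hy0' : (0:Int) ≤ y + 1 := by omega
    simp [splitBlockArgsMin, List.filter, hx1, hy1, hx0, hx0', hy0, hy0']

-- the heart of the equivalence: first ':'/'.' index = min of the nonnegative finds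
theorem argsMin_eq_findDelim (s : List Char) :
    splitBlockArgsMin (PySem.Chars.find s [':']) (PySem.Chars.find s ['.'])
      = (findDelim s).map (fun n => (n : Int)) := by
  induction s with
  | nil => simp [splitBlockArgsMin, findDelim, PySem.Chars.find, PySem.Chars.find.go, List.isEmpty]
  | cons a s ih =>
    rw [find_cons, find_cons, findDelim]
    have hneg : ¬ ((0:Int) ≤ -1) := by norm_num
    by_cases ha : a = ':'
    · have hy := PySem.Chars.neg_one_le_find s ['.']
      have ha2 : a ≠ '.' := by rw [ha]; decide
      by_cases hy1 : PySem.Chars.find s ['.'] = -1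
      · simp [splitBlockArgsMin, List.filter, ha, hy1]
      · have hy0 : (0:Int) ≤ PySem.Chars.find s ['.'] := by omega
        have hy0' : (0:Int) ≤ PySem.Chars.find s ['.'] + 1 := by omega
        simp [splitBlockArgsMin, List.filter, ha, hy1, hy0']
    · by_cases ha2 : a = '.'
      · have hx := PySem.Chars.neg_one_le_find s [':']
        by_cases hx1 : PySem.Chars.find s [':'] = -1
        · simp [splitBlockArgsMin, List.filter, ha2, hx1]
        · have hx0 : (0:Int) ≤ PySem.Chars.find s [':'] := by omega
          have hx0' : (0:Int) ≤ PySem.Chars.find s [':'] + 1 := by omega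
          simp [splitBlockArgsMin, List.filter, ha2, hx1, hx0']
      · simp only [ha, ha2, if_false, or_self]
        rw [argsMin_shift _ _ (PySem.Chars.neg_one_le_find s [':']) (PySem.Chars.neg_one_le_find s ['.']), ih]
        cases findDelim s <;> simp

-- ===== VERDICT (by name: the statement is the Claim_ definition above) =====
theorem split_block_spec : Claim_equal_split_block := by
  intro s _
  unfold Spec_split_block split_block split_block_alt
  have h : splitBlockArgsMin (PySem.Str.find s ":") (PySem.Str.find s ".")
      = (findDelim s.toList).map (fun n => (n : Int)) := by
    have := argsMin_eq_findDelim s.toList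
    simpa [PySem.Str.find] using this
  rw [h]
  cases findDelim s.toList <;> simp
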